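-- pv_equiv track=rewrite | github.com/dnix/performa | src/performa/reporting/assumptions.py | _group_defaults_by_component
-- ===== SOURCE A (Python) =====
-- from typing import Any, Dict, List, Optional
--
-- def _group_defaults_by_component(defaulted_params: List[str]) -> Dict[str, List[str]]:
--     """Group defaulted parameters by component for better organization."""
--     groups = {
--         "Asset Parameters": [],
--         "Financing Parameters": [],
--         "Timeline Parameters": [],
--         "Other Parameters": [],
--     }
--
--     for param in defaulted_params:
--         if any(
--             keyword in param.lower()
--             for keyword in ["rent", "expense", "area", "occupancy"]
--         ):
--             groups["Asset Parameters"].append(param)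
--         elif any(
--             keyword in param.lower()
--             for keyword in ["loan", "debt", "rate", "ltv", "facility"]
--         ):
--             groups["Financing Parameters"].append(param)
--         elif any(
--             keyword in param.lower()
--             for keyword in ["date", "month", "duration", "timeline"]
--         ):
--             groups["Timeline Parameters"].append(param)
--         else:
--             groups["Other Parameters"].append(param)
--
--     # Remove empty groups
--     return {k: v for k, v in groups.items() if v}
-- ===== SOURCE B (Python) =====
-- RULES = [
--     ("Asset Parameters", ["rent", "expense", "area", "occupancy"]),
--     ("Financing Parameters", ["loan", "debt", "rate", "ltv", "facility"]),
--     ("Timeline Parameters", ["date", "month", "duration", "timeline"]),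
--     ("Other Parameters", []),
-- ]
--
--
-- def _category_index(param):
--     low = param.lower()
--     return next(
--         (i for i, (_, kws) in enumerate(RULES) if any(k in low for k in kws)),
--         len(RULES) - 1,
--     )
--
--
-- def _group_defaults_by_component(defaulted_params):
--     """Group defaulted parameters by component: one filter pass per category."""
--     result = {}
--     for i, (name, _) in enumerate(RULES):
--         members = [p for p in defaulted_params if _category_index(p) == i]
--         if members:
--             result[name] = members
--     return result
-- ===== Notes on version B (the rewrite author's own statement) =====
-- stated objective: alternative
-- what changed: B replaces A's single loop that appends into a fixed four-key dict (then drops empty groups) with an ordered rules table and one filter pass per category, keeping only non-empty groups as they are built.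
import Mathlib
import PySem

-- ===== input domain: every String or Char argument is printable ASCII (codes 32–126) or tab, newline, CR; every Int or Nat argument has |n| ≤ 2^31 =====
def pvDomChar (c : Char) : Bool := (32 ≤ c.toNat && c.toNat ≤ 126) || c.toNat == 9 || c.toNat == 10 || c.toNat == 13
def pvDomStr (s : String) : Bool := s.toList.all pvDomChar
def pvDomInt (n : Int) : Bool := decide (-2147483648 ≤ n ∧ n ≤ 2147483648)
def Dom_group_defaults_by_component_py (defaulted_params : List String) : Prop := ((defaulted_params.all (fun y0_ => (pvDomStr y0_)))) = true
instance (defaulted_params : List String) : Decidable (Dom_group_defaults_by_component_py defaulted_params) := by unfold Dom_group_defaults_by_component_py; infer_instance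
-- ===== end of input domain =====

-- B groups by an ordered rules table with one filter pass per category instead of A's
-- single appending loop over a fixed four-key dict; objective: alternative decomposition.

-- ===== PORT A =====
-- any(keyword in param.lower() for keyword in kws)
def pvAnyKw (kws : List String) (param : String) : Bool :=
  kws.any (fun kw => PySem.Str.isIn kw (PySem.Str.lower param))

def group_defaults_by_component_py (defaulted_params : List String) : List (String × List String) :=
  let groups0 : PySem.Dict String (List String) :=
    PySem.Dict.ofList [("Asset Parameters", []), ("Financing Parameters", []),
                       ("Timeline Parameters", []), ("Other Parameters", [])]
  let groups := defaulted_params.foldl (fun g param =>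
    if pvAnyKw ["rent", "expense", "area", "occupancy"] param then
      g.modify "Asset Parameters" [] (· ++ [param])
    else if pvAnyKw ["loan", "debt", "rate", "ltv", "facility"] param then
      g.modify "Financing Parameters" [] (· ++ [param])
    else if pvAnyKw ["date", "month", "duration", "timeline"] param then
      g.modify "Timeline Parameters" [] (· ++ [param])
    else
      g.modify "Other Parameters" [] (· ++ [param])) groups0
  groups.items.filter (fun kv => !kv.2.isEmpty)

-- ===== PORT B =====
def pvRules : List (String × List String) :=
  [("Asset Parameters", ["rent", "expense", "area", "occupancy"]),
   ("Financing Parameters", ["loan", "debt", "rate", "ltv", "facility"]),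
   ("Timeline Parameters", ["date", "month", "duration", "timeline"]),
   ("Other Parameters", [])]

def pvCategoryIndex (param : String) : Int :=
  let low := PySem.Str.lower param
  match (PySem.List.enumerate pvRules).find?
      (fun ir => ir.2.2.any (fun k => PySem.Str.isIn k low)) with
  | some ir => ir.1
  | none => (pvRules.length : Int) - 1

def group_defaults_by_component_py_alt (defaulted_params : List String) : List (String × List String) :=
  (PySem.List.enumerate pvRules).foldl (fun result ir =>
    let members := defaulted_params.filter (fun p => pvCategoryIndex p == ir.1)
    if members.isEmpty then result else result ++ [(ir.2.1, members)]) []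

-- ===== PRECONDITION & SPEC =====
def Spec_group_defaults_by_component_py (defaulted_params : List String) (out : List (String × List String)) : Prop := out = group_defaults_by_component_py_alt defaulted_params
instance (defaulted_params : List String) (out : List (String × List String)) : Decidable (Spec_group_defaults_by_component_py defaulted_params out) := by unfold Spec_group_defaults_by_component_py; infer_instance

-- ===== CLAIM (what is proved, stated in full; the proofs are below) =====
def Claim_equal_group_defaults_by_component_py : Prop := ∀ (defaulted_params : List String), Dom_group_defaults_by_component_py defaulted_params → Spec_group_defaults_by_component_py defaulted_params (group_defaults_by_component_py defaulted_params)

-- ===== LEMMAS AND PROOFS =====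

-- the key A's loop body modifies for a given param
def pvKeyOf (param : String) : String :=
  if pvAnyKw ["rent", "expense", "area", "occupancy"] param then "Asset Parameters"
  else if pvAnyKw ["loan", "debt", "rate", "ltv", "facility"] param then "Financing Parameters"
  else if pvAnyKw ["date", "month", "duration", "timeline"] param then "Timeline Parameters"
  else "Other Parameters"

def pvD0 : PySem.Dict String (List String) :=
  PySem.Dict.ofList [("Asset Parameters", []), ("Financing Parameters", []),
                     ("Timeline Parameters", []), ("Other Parameters", [])]

theorem pvD0_eq : pvD0 = PySem.Dict.mk [("Asset Parameters", []), ("Financing Parameters", []),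
    ("Timeline Parameters", []), ("Other Parameters", [])] := by decide

theorem pvD0_keys : pvD0.keys = ["Asset Parameters", "Financing Parameters",
    "Timeline Parameters", "Other Parameters"] := by decide

theorem pvD0_getD (c : String) : pvD0.getD c [] = [] := by
  rw [pvD0_eq, PySem.Dict.getD_eq_get?_getD]
  simp only [PySem.Dict.get?_mk_cons]
  split_ifs <;> rfl

theorem pvKeyOf_mem (x : String) : pvKeyOf x ∈ pvD0.keys := by
  rw [pvD0_keys]; unfold pvKeyOf; split_ifs <;> simp

theorem pvStep_eq (g : PySem.Dict String (List String)) (param : String) :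
    (if pvAnyKw ["rent", "expense", "area", "occupancy"] param then
       g.modify "Asset Parameters" [] (· ++ [param])
     else if pvAnyKw ["loan", "debt", "rate", "ltv", "facility"] param then
       g.modify "Financing Parameters" [] (· ++ [param])
     else if pvAnyKw ["date", "month", "duration", "timeline"] param then
       g.modify "Timeline Parameters" [] (· ++ [param])
     else g.modify "Other Parameters" [] (· ++ [param]))
    = g.modify (pvKeyOf param) [] (· ++ [param]) := by
  unfold pvKeyOf; split_ifs <;> rfl

def pvFoldD (l : List String) : PySem.Dict String (List String) :=
  (l.map (fun x => (pvKeyOf x, x))).foldl (fun d p => d.modify p.1 [] (· ++ [p.2])) pvD0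

-- A's loop rewritten as a modify-at-key fold over pairs
theorem pvFold_eq (l : List String) :
    l.foldl (fun g param =>
      if pvAnyKw ["rent", "expense", "area", "occupancy"] param then
        g.modify "Asset Parameters" [] (· ++ [param])
      else if pvAnyKw ["loan", "debt", "rate", "ltv", "facility"] param then
        g.modify "Financing Parameters" [] (· ++ [param])
      else if pvAnyKw ["date", "month", "duration", "timeline"] param then
        g.modify "Timeline Parameters" [] (· ++ [param])
      else g.modify "Other Parameters" [] (· ++ [param])) pvD0
    = pvFoldD l := by
  unfold pvFoldD
  rw [List.foldl_map]
  apply PySem.List.foldl_congr_mem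
  intro acc x _
  exact pvStep_eq acc x

theorem pvFoldD_getD (l : List String) (c : String) :
    (pvFoldD l).getD c [] = l.filter (fun x => pvKeyOf x == c) := by
  unfold pvFoldD
  rw [PySem.Dict.getD_foldl_modify_append, pvD0_getD]
  simp [List.filter_map, Function.comp_def]

theorem pvFoldD_keys (l : List String) : (pvFoldD l).keys = pvD0.keys := by
  unfold pvFoldD
  rw [PySem.Dict.keys_foldl_modify_key]
  rw [PySem.Set.update_eq_append_filter]
  have hfil : ((PySem.Set.ofList ((l.map (fun x => (pvKeyOf x, x))).map Prod.fst)).filter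
      (fun y => !(PySem.Set.contains pvD0.keys y))) = [] := by
    rw [List.filter_eq_nil_iff]
    intro y hy
    simp only [List.map_map, Function.comp_def] at hy
    rw [PySem.Set.mem_ofList] at hy
    obtain ⟨x, -, rfl⟩ := List.mem_map.mp hy
    simpa using pvKeyOf_mem x
  rw [hfil, List.append_nil]

theorem pvFoldD_nodup (l : List String) : (pvFoldD l).keys.Nodup := by
  rw [pvFoldD_keys, pvD0_keys]; decide

theorem pvFoldD_items (l : List String) :
    (pvFoldD l).items =
      [("Asset Parameters", l.filter (fun x => pvKeyOf x == "Asset Parameters")),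
       ("Financing Parameters", l.filter (fun x => pvKeyOf x == "Financing Parameters")),
       ("Timeline Parameters", l.filter (fun x => pvKeyOf x == "Timeline Parameters")),
       ("Other Parameters", l.filter (fun x => pvKeyOf x == "Other Parameters"))] := by
  rw [PySem.Dict.items_eq_map_keys (pvFoldD l) (pvFoldD_nodup l) []]
  rw [pvFoldD_keys, pvD0_keys]
  simp [pvFoldD_getD]

-- B's category index as an if-chain over the same conditions
theorem pvCategoryIndex_eq (x : String) :
    pvCategoryIndex x =
      (if pvAnyKw ["rent", "expense", "area", "occupancy"] x then 0
       else if pvAnyKw ["loan", "debt", "rate", "ltv", "facility"] x then 1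
       else if pvAnyKw ["date", "month", "duration", "timeline"] x then 2
       else 3) := by
  unfold pvCategoryIndex pvRules pvAnyKw
  simp only [PySem.List.enumerate_cons, PySem.List.enumerate_nil, List.find?,
    List.any_cons, List.any_nil, Bool.or_false, Bool.or_eq_true]
  split_ifs with h1 h2 h3
  · rcases h1 with h | h | h | h <;> simp_all
  · rcases h2 with h | h | h | h | h <;> simp_all
  · rcases h3 with h | h | h | h <;> simp_all
  · simp_all

theorem pvCat0 (x : String) : (pvCategoryIndex x == (0:Int)) = (pvKeyOf x == "Asset Parameters") := by
  rw [pvCategoryIndex_eq]; unfold pvKeyOf; split_ifs <;> decide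
theorem pvCat1 (x : String) : (pvCategoryIndex x == (1:Int)) = (pvKeyOf x == "Financing Parameters") := by
  rw [pvCategoryIndex_eq]; unfold pvKeyOf; split_ifs <;> decide
theorem pvCat2 (x : String) : (pvCategoryIndex x == (2:Int)) = (pvKeyOf x == "Timeline Parameters") := by
  rw [pvCategoryIndex_eq]; unfold pvKeyOf; split_ifs <;> decide
theorem pvCat3 (x : String) : (pvCategoryIndex x == (3:Int)) = (pvKeyOf x == "Other Parameters") := by
  rw [pvCategoryIndex_eq]; unfold pvKeyOf; split_ifs <;> decide

theorem pvFoldlOpt {A B : Type} (l : List A) (name : A → B) (mem : A → List String)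
    (acc : List (B × List String)) :
    l.foldl (fun res x => if (mem x).isEmpty then res else res ++ [(name x, mem x)]) acc
      = acc ++ l.flatMap (fun x => if (mem x).isEmpty then [] else [(name x, mem x)]) := by
  induction l generalizing acc with
  | nil => simp
  | cons a t ih =>
    simp only [List.foldl_cons, List.flatMap_cons, ih]
    split_ifs <;> simp

-- ===== VERDICT (by name: the statement is the Claim_ definition above) =====
theorem group_defaults_by_component_py_spec : Claim_equal_group_defaults_by_component_py := by
  intro l _
  unfold Spec_group_defaults_by_component_py
  show (List.foldl (fun g param =>
      if pvAnyKw ["rent", "expense", "area", "occupancy"] param then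
        g.modify "Asset Parameters" [] (· ++ [param])
      else if pvAnyKw ["loan", "debt", "rate", "ltv", "facility"] param then
        g.modify "Financing Parameters" [] (· ++ [param])
      else if pvAnyKw ["date", "month", "duration", "timeline"] param then
        g.modify "Timeline Parameters" [] (· ++ [param])
      else g.modify "Other Parameters" [] (· ++ [param])) pvD0 l).items.filter
        (fun kv => !kv.2.isEmpty)
    = (PySem.List.enumerate pvRules).foldl (fun res ir =>
        if (l.filter (fun p => pvCategoryIndex p == ir.1)).isEmpty then res
        else res ++ [(ir.2.1, l.filter (fun p => pvCategoryIndex p == ir.1))]) []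
  rw [pvFold_eq l, pvFoldD_items l,
      pvFoldlOpt (PySem.List.enumerate pvRules) (fun ir => ir.2.1)
        (fun ir => l.filter (fun p => pvCategoryIndex p == ir.1)) [], List.nil_append]
  simp only [pvRules, PySem.List.enumerate_cons, PySem.List.enumerate_nil,
    List.flatMap_cons, List.flatMap_nil, List.append_nil, Int.reduceAdd]
  rw [List.filter_congr (fun x (_ : x ∈ l) => pvCat0 x),
      List.filter_congr (fun x (_ : x ∈ l) => pvCat1 x),
      List.filter_congr (fun x (_ : x ∈ l) => pvCat2 x),
      List.filter_congr (fun x (_ : x ∈ l) => pvCat3 x)]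
  by_cases h1 : (List.filter (fun x => pvKeyOf x == "Asset Parameters") l).isEmpty = true <;>
  by_cases h2 : (List.filter (fun x => pvKeyOf x == "Financing Parameters") l).isEmpty = true <;>
  by_cases h3 : (List.filter (fun x => pvKeyOf x == "Timeline Parameters") l).isEmpty = true <;>
  by_cases h4 : (List.filter (fun x => pvKeyOf x == "Other Parameters") l).isEmpty = true <;>
  simp [h1, h2, h3, h4]
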